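-- pv_equiv track=rewrite | github.com/JoanFer030/heuristic_exercises | unit-05/travelling_salesman_TS.py | is_tabu
-- ===== SOURCE A (Python) =====
-- def is_tabu(solution, tabu_list):
--     """
--     Check if a solution contains any tabu edges
--     """
--     size = len(solution)
--     for i in range(size):
--         if i == size - 1:
--             edge = [solution[i], solution[0]]
--         else:
--             edge = [solution[i], solution[i + 1]]
--         if edge in tabu_list or [edge[1], edge[0]] in tabu_list:
--             return True
--
--     return False
-- ===== SOURCE B (Python) =====
-- def is_tabu(solution, tabu_list):
--     """
--     Check if a solution contains any tabu edges.
--     Inverted strategy: build an adjacency map of the tour once (each city ->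
--     set of its cyclic neighbours), then judge each tabu entry by a single
--     adjacency probe instead of scanning the tour's edges against the list.
--     """
--     n = len(solution)
--     adj = {}
--     for i, u in enumerate(solution):
--         v = solution[(i + 1) % n]
--         adj.setdefault(u, set()).add(v)
--         adj.setdefault(v, set()).add(u)
--     return any(len(t) == 2 and t[1] in adj.get(t[0], set()) for t in tabu_list)
-- ===== Notes on version B (the rewrite author's own statement) =====
-- stated objective: faster
-- what changed: Inverts the traversal: instead of walking the tour's edges and scanning tabu_list for each (both orientations), B builds an adjacency map of the tour once (city -> set of cyclic neighbours) and then decides each tabu entry with a single adjacency probe.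
import Mathlib
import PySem

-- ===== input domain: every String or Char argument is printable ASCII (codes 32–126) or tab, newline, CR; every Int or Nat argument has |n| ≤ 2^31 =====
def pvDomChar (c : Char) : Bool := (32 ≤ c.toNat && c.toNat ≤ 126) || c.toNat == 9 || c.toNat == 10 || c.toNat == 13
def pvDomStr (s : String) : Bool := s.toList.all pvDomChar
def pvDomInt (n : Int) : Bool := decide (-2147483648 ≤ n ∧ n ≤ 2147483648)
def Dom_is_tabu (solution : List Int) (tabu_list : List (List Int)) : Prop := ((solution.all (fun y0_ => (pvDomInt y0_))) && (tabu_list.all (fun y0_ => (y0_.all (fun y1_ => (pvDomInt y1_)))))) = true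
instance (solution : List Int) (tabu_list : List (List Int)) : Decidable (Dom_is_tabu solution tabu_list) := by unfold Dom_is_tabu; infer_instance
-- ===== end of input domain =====

-- B inverts the traversal: it builds an adjacency map of the tour once, then decides each tabu entry by one adjacency probe.

-- ===== PORT A =====
-- the for-loop over range(size) with its early 'return True'
def is_tabu_go (solution : List Int) (tabu_list : List (List Int)) (size : Int) : List Int → Bool
  | [] => false
  | i :: rest =>
    let edge : List Int :=
      if i == size - 1 then
        [PySem.List.pyGetD solution i 0, PySem.List.pyGetD solution 0 0]
      else
        [PySem.List.pyGetD solution i 0, PySem.List.pyGetD solution (i + 1) 0]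
    if tabu_list.contains edge || tabu_list.contains [PySem.List.pyGetD edge 1 0, PySem.List.pyGetD edge 0 0] then
      true
    else
      is_tabu_go solution tabu_list size rest

def is_tabu (solution : List Int) (tabu_list : List (List Int)) : Bool :=
  let size : Int := solution.length
  is_tabu_go solution tabu_list size (PySem.List.pyRange 0 size 1)

-- ===== PORT B =====
def is_tabu_alt (solution : List Int) (tabu_list : List (List Int)) : Bool :=
  let n : Int := solution.length
  -- for i, u in enumerate(solution): v = solution[(i+1) % n]; adj.setdefault(u, set()).add(v); adj.setdefault(v, set()).add(u)
  let adj : PySem.Dict Int (PySem.Set Int) :=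
    (PySem.List.enumerate solution 0).foldl
      (fun d p =>
        let u := p.2
        let v := PySem.List.pyGetD solution (PySem.Int.mod (p.1 + 1) n) 0
        (d.modify u PySem.Set.empty (fun s => PySem.Set.add s v)).modify v PySem.Set.empty (fun s => PySem.Set.add s u))
      PySem.Dict.empty
  -- any(len(t) == 2 and t[1] in adj.get(t[0], set()) for t in tabu_list)
  tabu_list.any (fun t =>
    t.length == 2 && (adj.getD (PySem.List.pyGetD t 0 0) PySem.Set.empty).contains (PySem.List.pyGetD t 1 0))

-- ===== PRECONDITION & SPEC =====
def Spec_is_tabu (solution : List Int) (tabu_list : List (List Int)) (out : Bool) : Prop := out = is_tabu_alt solution tabu_list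
instance (solution : List Int) (tabu_list : List (List Int)) (out : Bool) : Decidable (Spec_is_tabu solution tabu_list out) := by unfold Spec_is_tabu; infer_instance

-- ===== CLAIM (what is proved, stated in full; the proofs are below) =====
def Claim_equal_is_tabu : Prop := ∀ (solution : List Int) (tabu_list : List (List Int)), Dom_is_tabu solution tabu_list → Spec_is_tabu solution tabu_list (is_tabu solution tabu_list)

-- ===== LEMMAS AND PROOFS =====

-- the cyclic successor of position k, as both programs compute it
def pvNext (s : List Int) (k : Nat) : Int :=
  if k = s.length - 1 then s.getD 0 0 else s.getD (k + 1) 0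

-- per-index check of A's loop body
def pvChk (s : List Int) (t : List (List Int)) (k : Nat) : Bool :=
  t.contains [s.getD k 0, pvNext s k] || t.contains [pvNext s k, s.getD k 0]

-- the common existential both programs decide
def pvHit (s : List Int) (t : List (List Int)) : Prop :=
  ∃ k : Nat, k < s.length ∧ pvChk s t k = true

theorem pvGetD_pair_one (a b d : Int) : PySem.List.pyGetD [a, b] 1 d = b := by
  simp [PySem.List.pyGetD, PySem.List.pyGet?, PySem.List.pyIdx?]

theorem pvGetD_pair_zero (a b d : Int) : PySem.List.pyGetD [a, b] 0 d = a := by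
  simp [PySem.List.pyGetD, PySem.List.pyGet?, PySem.List.pyIdx?]

-- A's loop body as a function of the Int index
def pvBody (s : List Int) (t : List (List Int)) (n : Int) (i : Int) : Bool :=
  let a := PySem.List.pyGetD s i 0
  let b := if i == n - 1 then PySem.List.pyGetD s 0 0 else PySem.List.pyGetD s (i + 1) 0
  t.contains [a, b] || t.contains [b, a]

theorem pv_go_eq_any (s : List Int) (t : List (List Int)) (n : Int) (is : List Int) :
    is_tabu_go s t n is = is.any (pvBody s t n) := by
  induction is with
  | nil => rfl
  | cons i rest ih =>
    simp only [is_tabu_go, List.any_cons, ih, pvBody]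
    by_cases h : (i == n - 1) = true <;>
      simp only [h, if_true, Bool.false_eq_true, if_false, pvGetD_pair_one, pvGetD_pair_zero] <;>
      split <;> simp_all

theorem pvGetD_zero (s : List Int) (d : Int) : PySem.List.pyGetD s 0 d = s.getD 0 d := by
  rw [show (0 : Int) = ((0 : Nat) : Int) from rfl, PySem.List.pyGetD_natCast]

theorem pvBody_natCast (s : List Int) (t : List (List Int)) (k : Nat) (hk : k < s.length) :
    pvBody s t (s.length : Int) (k : Int) = pvChk s t k := by
  unfold pvBody pvChk pvNext
  have hb : ((k : Int) == (s.length : Int) - 1) = decide (k = s.length - 1) := by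
    rw [Bool.eq_iff_iff]
    simp only [beq_iff_eq, decide_eq_true_eq]
    omega
  rw [hb]
  by_cases h : k = s.length - 1
  · rw [decide_eq_true h, if_pos h]
    simp only [if_true, PySem.List.pyGetD_natCast, pvGetD_zero]
  · rw [decide_eq_false h, if_neg h]
    have h1 : ((k : Int) + 1) = ((k + 1 : Nat) : Int) := by push_cast; ring
    simp only [Bool.false_eq_true, if_false, h1, PySem.List.pyGetD_natCast]

theorem pvA_iff (s : List Int) (t : List (List Int)) :
    is_tabu s t = true ↔ pvHit s t := by
  unfold is_tabu pvHit
  rw [pv_go_eq_any, PySem.List.pyRange_zero_natCast]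
  simp only [List.any_map, List.any_eq_true, List.mem_range, Function.comp]
  constructor
  · rintro ⟨k, hk, hc⟩
    exact ⟨k, hk, by rw [← pvBody_natCast s t k hk]; exact hc⟩
  · rintro ⟨k, hk, hc⟩
    exact ⟨k, hk, by rw [pvBody_natCast s t k hk]; exact hc⟩

-- B's per-step neighbour value, before index normalisation
def pvNxtI (s : List Int) (i : Int) : Int :=
  PySem.List.pyGetD s (PySem.Int.mod (i + 1) (s.length : Int)) 0

-- B's fold step
def pvStep (s : List Int) (d : PySem.Dict Int (PySem.Set Int)) (p : Int × Int) :
    PySem.Dict Int (PySem.Set Int) :=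
  (d.modify p.2 PySem.Set.empty (fun x => PySem.Set.add x (pvNxtI s p.1))).modify (pvNxtI s p.1)
    PySem.Set.empty (fun x => PySem.Set.add x p.2)

-- membership in the adjacency dictionary after the fold
theorem pv_adj_mem (s : List Int) (l : List (Int × Int)) (d : PySem.Dict Int (PySem.Set Int))
    (a b : Int) :
    b ∈ (l.foldl (pvStep s) d).getD a PySem.Set.empty ↔
      b ∈ d.getD a PySem.Set.empty ∨
        ∃ p ∈ l, (p.2 = a ∧ pvNxtI s p.1 = b) ∨ (pvNxtI s p.1 = a ∧ p.2 = b) := by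
  induction l generalizing d with
  | nil => simp
  | cons p rest ih =>
    simp only [List.foldl_cons, ih, List.mem_cons]
    have hstep : b ∈ (pvStep s d p).getD a PySem.Set.empty ↔
        b ∈ d.getD a PySem.Set.empty ∨
          (p.2 = a ∧ pvNxtI s p.1 = b) ∨ (pvNxtI s p.1 = a ∧ p.2 = b) := by
      simp only [pvStep, PySem.Dict.getD_modify]
      split_ifs <;> simp_all [PySem.Set.mem_add] <;> tauto
    rw [hstep]
    constructor
    · rintro (h | ⟨q, hq, hc⟩)
      · rcases h with h | h
        · exact Or.inl h
        · exact Or.inr ⟨p, Or.inl rfl, h⟩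
      · exact Or.inr ⟨q, Or.inr hq, hc⟩
    · rintro (h | ⟨q, (rfl | hq), hc⟩)
      · exact Or.inl (Or.inl h)
      · exact Or.inl (Or.inr hc)
      · exact Or.inr ⟨q, hq, hc⟩

-- the neighbour value at a genuine index k < len equals pvNext
theorem pvNxtI_natCast (s : List Int) (k : Nat) (hk : k < s.length) :
    pvNxtI s (k : Int) = pvNext s k := by
  unfold pvNxtI pvNext
  have h1 : ((k : Int) + 1) = ((k + 1 : Nat) : Int) := by push_cast; ring
  rw [h1, PySem.Int.mod_natCast, PySem.List.pyGetD_natCast]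
  by_cases h : k = s.length - 1
  · have he : k + 1 = s.length := by omega
    have h0 : (k + 1) % s.length = 0 := by rw [he, Nat.mod_self]
    rw [if_pos h, h0]
  · have h0 : (k + 1) % s.length = k + 1 := Nat.mod_eq_of_lt (by omega)
    rw [if_neg h, h0]

-- B's whole body, with the fold step named (definitionally equal: pvStep is the step lambda)
theorem pv_alt_eq (s : List Int) (t : List (List Int)) :
    is_tabu_alt s t = t.any (fun tl =>
      tl.length == 2 &&
        (((PySem.List.enumerate s 0).foldl (pvStep s) PySem.Dict.empty).getD
            (PySem.List.pyGetD tl 0 0) PySem.Set.empty).contains (PySem.List.pyGetD tl 1 0)) := rfl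

theorem pvB_iff (s : List Int) (t : List (List Int)) :
    is_tabu_alt s t = true ↔ pvHit s t := by
  rw [pv_alt_eq]
  simp only [List.any_eq_true, Bool.and_eq_true, beq_iff_eq]
  constructor
  · rintro ⟨tl, htl, hlen, hc⟩
    obtain ⟨x, y, rfl⟩ : ∃ x y, tl = [x, y] := by
      match tl, hlen with
      | [x, y], _ => exact ⟨x, y, rfl⟩
    rw [pvGetD_pair_zero, pvGetD_pair_one, PySem.Set.contains_iff, pv_adj_mem] at hc
    rcases hc with h | ⟨p, hp, hc⟩
    · simp [PySem.Dict.getD_empty] at h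
    · rw [PySem.List.mem_enumerate_iff] at hp
      obtain ⟨k, hk, rfl⟩ := hp
      refine ⟨k, hk, ?_⟩
      unfold pvChk
      simp only [zero_add, pvNxtI_natCast s k hk] at hc
      simp only [Bool.or_eq_true, List.contains_iff_mem]
      rw [List.getD_eq_getElem _ _ hk]
      rcases hc with ⟨rfl, rfl⟩ | ⟨rfl, rfl⟩
      · exact Or.inl htl
      · exact Or.inr htl
  · rintro ⟨k, hk, hc⟩
    unfold pvChk at hc
    have hp : ((k : Int), s[k]) ∈ PySem.List.enumerate s 0 := by
      rw [PySem.List.mem_enumerate_iff]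
      exact ⟨k, hk, by simp⟩
    have hnx := pvNxtI_natCast s k hk
    rcases Bool.or_eq_true_iff.mp hc with h | h
    · refine ⟨[s.getD k 0, pvNext s k], List.contains_iff_mem.mp h, rfl, ?_⟩
      rw [pvGetD_pair_zero, pvGetD_pair_one, PySem.Set.contains_iff, pv_adj_mem]
      exact Or.inr ⟨((k : Int), s[k]), hp, Or.inl ⟨(List.getD_eq_getElem _ _ hk).symm, hnx⟩⟩
    · refine ⟨[pvNext s k, s.getD k 0], List.contains_iff_mem.mp h, rfl, ?_⟩
      rw [pvGetD_pair_zero, pvGetD_pair_one, PySem.Set.contains_iff, pv_adj_mem]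
      exact Or.inr ⟨((k : Int), s[k]), hp, Or.inr ⟨hnx, (List.getD_eq_getElem _ _ hk).symm⟩⟩

-- ===== VERDICT (by name: the statement is the Claim_ definition above) =====
theorem is_tabu_spec : Claim_equal_is_tabu := by
  intro s t _
  unfold Spec_is_tabu
  by_cases h : pvHit s t
  · rw [(pvA_iff s t).mpr h, ((pvB_iff s t).mpr h).symm]
  · have hA := (pvA_iff s t).not.mpr h
    have hB := (pvB_iff s t).not.mpr h
    simp only [Bool.not_eq_true] at hA hB
    rw [hA, hB]
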